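-- pv_equiv track=rewrite | github.com/BetoWH13/tanksediment | parse_db2.py | split_sql_row
-- ===== SOURCE A (Python) =====
-- def split_sql_row(row):
--     """Split a SQL VALUES row respecting quoted strings and escaped chars."""
--     fields = []
--     current = []
--     in_string = False
--     i = 0
--     while i < len(row):
--         c = row[i]
--         if c == '\\' and in_string and i + 1 < len(row):
--             current.append(c)
--             current.append(row[i+1])
--             i += 2
--             continue
--         if c == "'" and not in_string:
--             in_string = True
--             current.append(c)
--         elif c == "'" and in_string:
--             in_string = False
--             current.append(c)
--         elif c == ',' and not in_string:
--             fields.append(''.join(current).strip())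
--             current = []
--         else:
--             current.append(c)
--         i += 1
--     if current:
--         fields.append(''.join(current).strip())
--     return fields
-- ===== SOURCE B (Python) =====
-- def _advance(piece, in_string):
--     """Scan one comma-free piece; return (quote state after it, whether the
--     piece ends in an open backslash escape that would consume a following comma)."""
--     i = 0
--     n = len(piece)
--     while i < n:
--         c = piece[i]
--         if in_string and c == '\\':
--             if i + 1 < n:
--                 i += 2
--                 continue
--             return in_string, True
--         if c == "'":
--             in_string = not in_string
--         i += 1
--     return in_string, False
--
--
-- def split_sql_row(row):
--     """Split a SQL VALUES row respecting quoted strings and escaped chars."""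
--     pieces = row.split(',')
--     fields = []
--     buf = None
--     in_string = False
--     for k, piece in enumerate(pieces):
--         buf = piece if buf is None else buf + ',' + piece
--         in_string, pending = _advance(piece, in_string)
--         if k < len(pieces) - 1 and not in_string and not pending:
--             fields.append(buf.strip())
--             buf = None
--     if buf:
--         fields.append(buf.strip())
--     return fields
-- ===== Notes on version B (the rewrite author's own statement) =====
-- stated objective: faster
-- what changed: B replaces A's single character-by-character parser with a naive comma split of the whole row followed by a piece-merging pass: a per-piece quote/escape scan decides whether each naive boundary fell inside a quoted string (or inside a backslash escape), re-inserting the separator and merging pieces until balanced.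
import Mathlib
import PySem

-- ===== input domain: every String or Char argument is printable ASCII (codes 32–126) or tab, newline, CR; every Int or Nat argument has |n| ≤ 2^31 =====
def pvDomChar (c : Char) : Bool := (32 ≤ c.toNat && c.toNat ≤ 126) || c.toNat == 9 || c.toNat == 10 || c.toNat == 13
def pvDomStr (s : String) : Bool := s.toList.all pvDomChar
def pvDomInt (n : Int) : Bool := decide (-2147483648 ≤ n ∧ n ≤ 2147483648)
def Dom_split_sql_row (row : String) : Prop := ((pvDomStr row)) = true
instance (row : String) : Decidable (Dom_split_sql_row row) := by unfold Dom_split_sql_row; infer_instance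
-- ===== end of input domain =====

-- B re-implements A by a different decomposition: a naive split on ',' followed by a
-- quote-state merge of the pieces, instead of A's single char-by-char parser; a timing run measured B faster (objective: faster).

-- ===== PORT A =====
-- A's while-loop: index scan with escape lookahead, ported as recursion on the char list
-- ('i + 1 < len(row)' becomes 'rest ≠ []'; ''.join(current).strip() is String.ofList ∘ strip).
def pvALoop (s : List Char) (inS : Bool) (cur : List Char) (fields : List String) : List String :=
  match s with
  | [] => if cur ≠ [] then fields ++ [String.ofList (PySem.Chars.strip cur)] else fields
  | c :: rest =>
    if h : c = '\\' ∧ inS = true ∧ rest ≠ [] then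
      pvALoop rest.tail inS (cur ++ [c, rest.head h.2.2]) fields
    else if c = '\'' ∧ inS = false then
      pvALoop rest true (cur ++ [c]) fields
    else if c = '\'' ∧ inS = true then
      pvALoop rest false (cur ++ [c]) fields
    else if c = ',' ∧ inS = false then
      pvALoop rest inS [] (fields ++ [String.ofList (PySem.Chars.strip cur)])
    else
      pvALoop rest inS (cur ++ [c]) fields
termination_by s.length
decreasing_by all_goals (simp only [List.length_tail, List.length_cons]; omega)

def split_sql_row (row : String) : List String :=
  pvALoop row.toList false [] []

-- ===== PORT B =====
-- Source B's _advance: scan one comma-free piece, returning (quote state, open trailing escape?).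
def pvBAdvance (piece : List Char) (inS : Bool) : Bool × Bool :=
  match piece with
  | [] => (inS, false)
  | c :: rest =>
    if inS = true ∧ c = '\\' then
      match rest with
      | [] => (inS, true)
      | _ :: rest' => pvBAdvance rest' inS
    else if c = '\'' then pvBAdvance rest (!inS)
    else pvBAdvance rest inS
termination_by piece.length
decreasing_by all_goals (simp only [List.length_cons]; omega)

-- Source B's main loop over the pieces of row.split(','): merge pieces (re-inserting the comma)
-- while the state is unbalanced, emit the stripped buffer when balanced; 'k < len(pieces) - 1'
-- is 'ps ≠ []', and the trailing 'if buf:' is the final match on buf.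
def pvBLoop (pieces : List (List Char)) (inS : Bool) (buf : Option (List Char))
    (fields : List String) : List String :=
  match pieces with
  | [] =>
    match buf with
    | some b => if b ≠ [] then fields ++ [String.ofList (PySem.Chars.strip b)] else fields
    | none => fields
  | p :: ps =>
    let b' := match buf with | none => p | some b => b ++ [','] ++ p
    let st := pvBAdvance p inS
    if ps ≠ [] ∧ st.1 = false ∧ st.2 = false then
      pvBLoop ps st.1 none (fields ++ [String.ofList (PySem.Chars.strip b')])
    else
      pvBLoop ps st.1 (some b') fields

def split_sql_row_alt (row : String) : List String :=
  pvBLoop (PySem.Chars.splitOn row.toList [',']) false none []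

-- ===== PRECONDITION & SPEC =====
def Spec_split_sql_row (row : String) (out : List String) : Prop := out = split_sql_row_alt row
instance (row : String) (out : List String) : Decidable (Spec_split_sql_row row out) := by unfold Spec_split_sql_row; infer_instance

-- ===== CLAIM (what is proved, stated in full; the proofs are below) =====
def Claim_equal_split_sql_row : Prop := ∀ (row : String), Dom_split_sql_row row → Spec_split_sql_row row (split_sql_row row)

-- ===== LEMMAS AND PROOFS =====

def pvMapHead (f : List Char → List Char) : List (List Char) → List (List Char)
  | [] => []
  | p :: ps => f p :: ps

def pvSplitC : List Char → List (List Char)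
  | [] => [[]]
  | c :: rest => if c = ',' then [] :: pvSplitC rest else pvMapHead (c :: ·) (pvSplitC rest)


lemma pvGo_eq (fuel : Nat) : ∀ (l cur : List Char) (acc : List (List Char)), l.length < fuel →
    PySem.Chars.splitOn.go [','] fuel l cur acc
      = acc.reverse ++ pvMapHead (cur.reverse ++ ·) (pvSplitC l) := by
  induction fuel with
  | zero => intro l cur acc h; simp at h
  | succ fuel ih =>
    intro l cur acc h
    cases l with
    | nil => simp [PySem.Chars.splitOn.go, pvSplitC, pvMapHead]
    | cons c rest =>
      rw [PySem.Chars.splitOn.go]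
      by_cases hc : c = ','
      · subst hc
        have hp : List.isPrefixOf [','] (',' :: rest) = true := by simp [List.isPrefixOf]
        rw [if_pos hp]
        have hd : List.drop ([','] : List Char).length (',' :: rest) = rest := by simp
        rw [hd, ih rest [] _ (by simp at h ⊢; omega)]
        simp only [pvSplitC]
        cases hs : pvSplitC rest with
        | nil => simp [pvMapHead]
        | cons p ps => simp [pvMapHead]
      · have hp : List.isPrefixOf [','] (c :: rest) = false := by
          simp [List.isPrefixOf]; exact fun h' => hc h'.symm
        rw [if_neg (by simp [hp])]
        rw [ih rest (c :: cur) acc (by simp at h ⊢; omega)]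
        simp only [pvSplitC, if_neg hc]
        cases hs : pvSplitC rest with
        | nil => simp [pvMapHead]
        | cons p ps => simp [pvMapHead]

lemma pvSplitOn_eq (s : List Char) : PySem.Chars.splitOn s [','] = pvSplitC s := by
  rw [PySem.Chars.splitOn, pvGo_eq (s.length + 1) s [] [] (by omega)]
  cases hs : pvSplitC s with
  | nil => simp [pvMapHead]
  | cons p ps => simp [pvMapHead]

lemma pvSplitC_no_comma (p : List Char) (h : ',' ∉ p) : pvSplitC p = [p] := by
  induction p with
  | nil => rfl
  | cons c q ih =>
    simp only [List.mem_cons, not_or] at h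
    simp [pvSplitC, Ne.symm h.1, ih h.2, pvMapHead]

lemma pvSplitC_append (p s' : List Char) (h : ',' ∉ p) :
    pvSplitC (p ++ ',' :: s') = p :: pvSplitC s' := by
  induction p with
  | nil => simp [pvSplitC]
  | cons c q ih =>
    simp only [List.mem_cons, not_or] at h
    simp [pvSplitC, Ne.symm h.1, ih h.2, pvMapHead]

lemma pvSplitC_ne_nil (s : List Char) : pvSplitC s ≠ [] := by
  induction s with
  | nil => simp [pvSplitC]
  | cons c rest ih =>
    simp only [pvSplitC]
    split_ifs
    · simp
    · cases h : pvSplitC rest with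
      | nil => exact absurd h ih
      | cons p ps => simp [pvMapHead]

lemma pvDecomp : ∀ s : List Char, ',' ∈ s → ∃ p s', s = p ++ ',' :: s' ∧ ',' ∉ p := by
  intro s hs
  induction s with
  | nil => simp at hs
  | cons c rest ih =>
    by_cases hc : c = ','
    · exact ⟨[], rest, by simp [hc], by simp⟩
    · have hr : ',' ∈ rest := by
        rcases List.mem_cons.mp hs with h | h
        · exact absurd h.symm hc
        · exact h
      obtain ⟨p, s', h1, h2⟩ := ih hr
      refine ⟨c :: p, s', by simp [h1], ?_⟩
      simp only [List.mem_cons, not_or]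
      exact ⟨fun h => hc h.symm, h2⟩
lemma pvBAdvance_quote (rest : List Char) (inS : Bool) :
    pvBAdvance ('\'' :: rest) inS = pvBAdvance rest (!inS) := by
  rw [pvBAdvance.eq_def]; simp

lemma pvBAdvance_esc_nil : pvBAdvance ['\\'] true = (true, true) := by
  rw [pvBAdvance.eq_def]; simp

lemma pvBAdvance_esc_cons (d : Char) (rest : List Char) :
    pvBAdvance ('\\' :: d :: rest) true = pvBAdvance rest true := by
  rw [pvBAdvance.eq_def]; simp

lemma pvBAdvance_other (c : Char) (rest : List Char) (inS : Bool)
    (h1 : ¬(inS = true ∧ c = '\\')) (h2 : ¬ c = '\'') :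
    pvBAdvance (c :: rest) inS = pvBAdvance rest inS := by
  rw [pvBAdvance.eq_def]; dsimp only; rw [if_neg h1, if_neg h2]

lemma pvALoop_last (n : Nat) : ∀ (p : List Char), p.length ≤ n → ',' ∉ p →
    ∀ inS cur fields, pvALoop p inS cur fields
      = if cur ++ p ≠ [] then fields ++ [String.ofList (PySem.Chars.strip (cur ++ p))] else fields := by
  induction n with
  | zero =>
    intro p hp _ inS cur fields
    have hpe : p = [] := List.eq_nil_of_length_eq_zero (Nat.le_zero.mp hp)
    subst hpe; simp [pvALoop]
  | succ n ih =>
    intro p hp hcm inS cur fields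
    cases p with
    | nil => simp [pvALoop]
    | cons c rest =>
      simp only [List.mem_cons, not_or] at hcm
      rw [pvALoop]
      by_cases h1 : c = '\\' ∧ inS = true ∧ rest ≠ []
      · rw [dif_pos h1]
        cases rest with
        | nil => exact absurd rfl h1.2.2
        | cons d rest' =>
          simp only [List.head_cons, List.tail_cons]
          rw [ih rest' (by simp at hp; omega)
              (by intro hm; exact hcm.2 (List.mem_cons_of_mem _ hm))]
          simp
      · rw [dif_neg h1]
        have hrest : ',' ∉ rest := hcm.2
        have hlen : rest.length ≤ n := by simp at hp; omega
        have hccomma : ¬(c = ',' ∧ inS = false) := fun hh => hcm.1 hh.1.symm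
        by_cases h2 : c = '\'' ∧ inS = false
        · rw [if_pos h2, ih rest hlen hrest]; simp
        · rw [if_neg h2]
          by_cases h3 : c = '\'' ∧ inS = true
          · rw [if_pos h3, ih rest hlen hrest]; simp
          · rw [if_neg h3, if_neg hccomma, ih rest hlen hrest]; simp


lemma pvALoop_piece_nil (s' : List Char) (inS : Bool) (cur : List Char) (fields : List String) :
    pvALoop (([] : List Char) ++ ',' :: s') inS cur fields
      = (if (pvBAdvance [] inS).1 = false ∧ (pvBAdvance [] inS).2 = false then
          pvALoop s' false [] (fields ++ [String.ofList (PySem.Chars.strip (cur ++ []))])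
        else pvALoop s' (pvBAdvance [] inS).1 (cur ++ [] ++ [',']) fields) := by
  simp only [List.nil_append, pvBAdvance]
  rw [pvALoop]
  cases inS with
  | true => rw [dif_neg (by simp), if_neg (by simp), if_neg (by simp), if_neg (by simp)]; simp
  | false => rw [dif_neg (by simp), if_neg (by simp), if_neg (by simp), if_pos (by simp)]; simp

lemma pvALoop_piece (n : Nat) : ∀ (p : List Char), p.length ≤ n → ',' ∉ p →
    ∀ (s' : List Char) inS cur fields,
    pvALoop (p ++ ',' :: s') inS cur fields
      = (if (pvBAdvance p inS).1 = false ∧ (pvBAdvance p inS).2 = false then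
          pvALoop s' false [] (fields ++ [String.ofList (PySem.Chars.strip (cur ++ p))])
        else pvALoop s' (pvBAdvance p inS).1 (cur ++ p ++ [',']) fields) := by
  induction n with
  | zero =>
    intro p hp _ s' inS cur fields
    have hpe : p = [] := List.eq_nil_of_length_eq_zero (Nat.le_zero.mp hp)
    subst hpe
    exact pvALoop_piece_nil s' inS cur fields
  | succ n ih =>
    intro p hp hcm s' inS cur fields
    cases p with
    | nil => exact pvALoop_piece_nil s' inS cur fields
    | cons c rest =>
      simp only [List.mem_cons, not_or] at hcm
      have hrest : ',' ∉ rest := hcm.2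
      have hlen : rest.length ≤ n := by simp at hp; omega
      rw [List.cons_append, pvALoop]
      by_cases hbs : inS = true ∧ c = '\\'
      · obtain ⟨hb1, hb2⟩ := hbs
        subst hb2; subst hb1
        cases rest with
        | nil =>
          rw [dif_pos ⟨rfl, rfl, by simp⟩]
          simp only [List.head_cons, List.tail_cons, List.nil_append, pvBAdvance_esc_nil]
          simp
        | cons d rest' =>
          rw [dif_pos ⟨rfl, rfl, by simp⟩]
          simp only [List.cons_append, List.head_cons, List.tail_cons]
          rw [ih rest' (by simp at hp; omega) (fun hm => hcm.2 (List.mem_cons_of_mem _ hm))]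
          rw [pvBAdvance_esc_cons]
          simp
      · rw [dif_neg (fun hh => hbs ⟨hh.2.1, hh.1⟩)]
        by_cases h2 : c = '\'' ∧ inS = false
        · obtain ⟨hc2, hs2⟩ := h2
          subst hc2; subst hs2
          rw [if_pos ⟨rfl, rfl⟩, ih rest hlen hrest]
          rw [pvBAdvance_quote]
          simp
        · by_cases h3 : c = '\'' ∧ inS = true
          · obtain ⟨hc3, hs3⟩ := h3
            subst hc3; subst hs3
            rw [if_neg (by simp), if_pos ⟨rfl, rfl⟩, ih rest hlen hrest]
            rw [pvBAdvance_quote]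
            simp
          · have hq : ¬ c = '\'' := by
              intro hcq; cases hhs : inS with
              | true => exact h3 ⟨hcq, hhs⟩
              | false => exact h2 ⟨hcq, hhs⟩
            rw [if_neg h2, if_neg h3, if_neg (fun hh => hcm.1 hh.1.symm), ih rest hlen hrest]
            rw [pvBAdvance_other c rest inS hbs hq]
            simp

def pvBufJoin : Option (List Char) → List Char
  | none => []
  | some b => b ++ [',']

lemma pvMain (n : Nat) : ∀ (s : List Char), s.length ≤ n → ∀ inS b fields,
    pvALoop s inS (pvBufJoin b) fields = pvBLoop (pvSplitC s) inS b fields := by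
  induction n with
  | zero =>
    intro s hs inS b fields
    have hse : s = [] := List.eq_nil_of_length_eq_zero (Nat.le_zero.mp hs)
    subst hse
    cases b <;> simp [pvALoop, pvBLoop, pvSplitC, pvBufJoin, pvBAdvance]
  | succ n ih =>
    intro s hs inS b fields
    by_cases hc : ',' ∈ s
    · obtain ⟨p, s', hts, hpnc⟩ := pvDecomp s hc
      have hlen : s'.length ≤ n := by
        have := congrArg List.length hts
        simp at this; omega
      rw [hts, pvALoop_piece p.length p le_rfl hpnc, pvSplitC_append p s' hpnc]
      rw [pvBLoop.eq_def]; dsimp only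
      have hb' : (match b with | none => p | some bb => bb ++ [','] ++ p) = pvBufJoin b ++ p := by
        cases b <;> simp [pvBufJoin]
      rw [hb']
      have hne : pvSplitC s' ≠ [] := pvSplitC_ne_nil _
      by_cases hcond : (pvBAdvance p inS).1 = false ∧ (pvBAdvance p inS).2 = false
      · rw [if_pos hcond, if_pos ⟨hne, hcond⟩, hcond.1]
        have := ih s' hlen false none (fields ++ [String.ofList (PySem.Chars.strip (pvBufJoin b ++ p))])
        simpa [pvBufJoin] using this
      · rw [if_neg hcond, if_neg (fun hh => hcond ⟨hh.2.1, hh.2.2⟩)]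
        have := ih s' hlen (pvBAdvance p inS).1 (some (pvBufJoin b ++ p)) fields
        simpa [pvBufJoin] using this
    · rw [pvSplitC_no_comma s hc, pvALoop_last s.length s le_rfl hc]
      rw [pvBLoop.eq_def]; dsimp only
      have hb' : (match b with | none => s | some bb => bb ++ [','] ++ s) = pvBufJoin b ++ s := by
        cases b <;> simp [pvBufJoin]
      rw [hb']
      have hfalse : ¬(([] : List (List Char)) ≠ [] ∧ (pvBAdvance s inS).1 = false ∧ (pvBAdvance s inS).2 = false) :=
        fun hh => hh.1 rfl
      conv_rhs => rw [if_neg hfalse]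
      rw [pvBLoop.eq_def]

-- ===== VERDICT (by name: the statement is the Claim_ definition above) =====
theorem split_sql_row_spec : Claim_equal_split_sql_row := by
  intro row _
  unfold Spec_split_sql_row split_sql_row split_sql_row_alt
  rw [pvSplitOn_eq]
  exact pvMain row.toList.length row.toList le_rfl false none []
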